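-- pv_equiv track=rewrite | github.com/wyk18703232953/myResearch | codeComplex/data copy/filteredData/python/quadratic/python_quadratic_0589.py | solve_single
-- ===== SOURCE A (Python) =====
-- def gen(n, b):
--     a = [(x + b) % 3 for x in range(n)]
--     s = ""
--     for i in range(n):
--         if a[i] == 0:
--             s += "R"
--         if a[i] == 1:
--             s += "G"
--         if a[i] == 2:
--             s += "B"
--     return s
--
-- def solve_single(n, k, s):
--     ans = n
--     for xi in range(3):
--         t = gen(n, xi)
--         diff = 0
--         for i in range(k):
--             if s[i] != t[i]:
--                 diff += 1
--         ans = min(ans, diff)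
--         for j in range(k, n):
--             if s[j - k] != t[j - k]:
--                 diff -= 1
--             if s[j] != t[j]:
--                 diff += 1
--             ans = min(ans, diff)
--     return ans
-- ===== SOURCE B (Python) =====
-- def solve_single(n, k, s):
--     # Prefix-sum decomposition: for each phase, a table of mismatch prefix sums,
--     # then every window cost is a difference of two table entries.
--     pat = "RGB"
--     best = n
--     for xi in range(3):
--         p = [0]
--         for i in range(n):
--             p.append(p[-1] + (s[i] != pat[(i + xi) % 3]))
--         for start in range(n - k + 1):
--             c = p[start + k] - p[start]
--             if c < best:
--                 best = c
--     return best
-- ===== Notes on version B (the rewrite author's own statement) =====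
-- stated objective: alternative
-- what changed: Replaces the generated pattern string plus sliding-window add/remove updates by a per-phase prefix-sum table of mismatches (pattern character computed directly from (i+xi)%3), so each window cost is a difference of two prefix sums and the minimum is a plain scan.
-- outside the precondition, e.g. on solve_single(-2, -2, ''): A returns -2, B raises IndexError
import Mathlib
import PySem

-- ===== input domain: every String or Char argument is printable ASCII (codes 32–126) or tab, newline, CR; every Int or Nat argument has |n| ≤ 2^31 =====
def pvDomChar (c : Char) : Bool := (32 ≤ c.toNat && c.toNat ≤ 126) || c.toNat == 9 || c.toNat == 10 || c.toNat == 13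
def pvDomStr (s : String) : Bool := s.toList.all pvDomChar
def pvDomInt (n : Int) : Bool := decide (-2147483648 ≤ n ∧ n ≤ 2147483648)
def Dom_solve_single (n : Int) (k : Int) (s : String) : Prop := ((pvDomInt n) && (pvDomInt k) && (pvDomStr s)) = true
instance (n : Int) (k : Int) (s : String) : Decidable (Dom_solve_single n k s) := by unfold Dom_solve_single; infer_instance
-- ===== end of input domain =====

-- B replaces A's generated pattern string and sliding add/remove updates by per-phase
-- prefix sums of mismatches (window cost = difference of two prefix sums); alternative
-- decomposition, same asymptotic cost. Equivalence is about the return value.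

-- ===== PORT A =====
-- helper gen(n, b) of A, on List Char
def pvGen (n b : Int) : List Char :=
  let a := (PySem.List.pyRange 0 n 1).map (fun x => PySem.Int.mod (x + b) 3)
  (PySem.List.pyRange 0 n 1).foldl (fun s i =>
    let ai := PySem.List.pyGetD a i 0
    let s1 := if ai = 0 then s ++ ['R'] else s
    let s2 := if ai = 1 then s1 ++ ['G'] else s1
    if ai = 2 then s2 ++ ['B'] else s2) []

def solve_single (n : Int) (k : Int) (s : String) : Int :=
  let cs := s.toList
  (PySem.List.pyRange 0 3 1).foldl (fun ans xi =>
    let t := pvGen n xi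
    let diff := (PySem.List.pyRange 0 k 1).foldl (fun d i =>
      if PySem.List.pyGetD cs i ' ' ≠ PySem.List.pyGetD t i ' ' then d + 1 else d) 0
    let ans1 := min ans diff
    ((PySem.List.pyRange k n 1).foldl (fun (st : Int × Int) j =>
      let d1 := if PySem.List.pyGetD cs (j - k) ' ' ≠ PySem.List.pyGetD t (j - k) ' ' then st.2 - 1 else st.2
      let d2 := if PySem.List.pyGetD cs j ' ' ≠ PySem.List.pyGetD t j ' ' then d1 + 1 else d1
      (min st.1 d2, d2)) (ans1, diff)).1) n

-- ===== PORT B =====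
-- the pattern string "RGB" of B
def pvPat : List Char := ['R', 'G', 'B']

def solve_single_alt (n : Int) (k : Int) (s : String) : Int :=
  let cs := s.toList
  (PySem.List.pyRange 0 3 1).foldl (fun best xi =>
    let p := (PySem.List.pyRange 0 n 1).foldl (fun p i =>
      p ++ [PySem.List.pyGetD p (-1) 0 +
        (if PySem.List.pyGetD cs i ' ' ≠ PySem.List.pyGetD pvPat (PySem.Int.mod (i + xi) 3) ' ' then 1 else 0)]) [0]
    (PySem.List.pyRange 0 (n - k + 1) 1).foldl (fun best start =>
      let c := PySem.List.pyGetD p (start + k) 0 - PySem.List.pyGetD p start 0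
      if c < best then c else best) best) n

-- ===== PRECONDITION & SPEC =====
-- Pre_ excludes exactly the inputs where Python A raises IndexError (n > len(s), or a
-- negative k with k < n) and the sliver n = k ≤ -2 of the degenerate corner, where A
-- returns its untouched initial value n but B's prefix-table lookup raises IndexError.
-- (The rest of that degenerate corner, n < 0 with n ≤ k ≤ 0, is kept inside: both
-- programs return n there.)
def Pre_solve_single (n : Int) (k : Int) (s : String) : Prop :=
  (0 ≤ k ∧ k ≤ n ∧ n ≤ PySem.Str.len s) ∨
  (n < 0 ∧ n ≤ k ∧ k ≤ 0 ∧ (n < k ∨ k = -1))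
instance (n : Int) (k : Int) (s : String) : Decidable (Pre_solve_single n k s) := by
  unfold Pre_solve_single; infer_instance

def pvWitness_solve_single : Int × Int × String := (3, 2, "RGX")

def Spec_solve_single (n : Int) (k : Int) (s : String) (out : Int) : Prop := out = solve_single_alt n k s
instance (n : Int) (k : Int) (s : String) (out : Int) : Decidable (Spec_solve_single n k s out) := by unfold Spec_solve_single; infer_instance

-- ===== CLAIM (what is proved, stated in full; the proofs are below) =====
def Claim_equal_solve_single : Prop := ∀ (n : Int) (k : Int) (s : String), Dom_solve_single n k s → Pre_solve_single n k s → Spec_solve_single n k s (solve_single n k s)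

-- ===== LEMMAS AND PROOFS =====

-- one mismatch indicator and range mismatch sums (proof-only helpers)
def pvMis (cs : List Char) (xi i : Int) : Int :=
  if PySem.List.pyGetD cs i ' ' ≠ PySem.List.pyGetD pvPat (PySem.Int.mod (i + xi) 3) ' ' then 1 else 0

def pvSum (cs : List Char) (xi a b : Int) : Int :=
  ((PySem.List.pyRange a b 1).map (pvMis cs xi)).sum

theorem pvSum_empty (cs : List Char) (xi a b : Int) (h : b ≤ a) : pvSum cs xi a b = 0 := by
  simp [pvSum, PySem.List.pyRange_one_eq_nil h]

theorem pvSum_succ (cs : List Char) (xi a b : Int) (h : a ≤ b) :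
    pvSum cs xi a (b + 1) = pvSum cs xi a b + pvMis cs xi b := by
  simp [pvSum, PySem.List.pyRange_one_succ_right h]

theorem pvSum_cons (cs : List Char) (xi a b : Int) (h : a < b) :
    pvSum cs xi a b = pvMis cs xi a + pvSum cs xi (a + 1) b := by
  simp [pvSum, PySem.List.pyRange_one_cons h]

theorem pvSum_split (cs : List Char) (xi a m b : Int) (h1 : a ≤ m) (h2 : m ≤ b) :
    pvSum cs xi a b = pvSum cs xi a m + pvSum cs xi m b := by
  simp [pvSum, PySem.List.pyRange_one_append a m b h1 h2]

theorem pvGen_eq (n b : Int) :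
    pvGen n b = (PySem.List.pyRange 0 n 1).map
      (fun x => PySem.List.pyGetD pvPat (PySem.Int.mod (x + b) 3) ' ') := by
  unfold pvGen
  dsimp only
  rw [PySem.List.foldl_congr_mem
      (g := fun s i => s ++ [PySem.List.pyGetD pvPat (PySem.Int.mod (i + b) 3) ' '])]
  · rw [PySem.List.foldl_append_singleton_eq_map]
    simp
  · intro acc x hx
    rw [PySem.List.mem_pyRange_one] at hx
    rw [PySem.List.pyGetD_map_pyRange_of_nonneg _ n x 0 hx.1 hx.2]
    have h0 : 0 ≤ PySem.Int.mod (x + b) 3 := PySem.Int.mod_nonneg _ (by norm_num)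
    have h3 : PySem.Int.mod (x + b) 3 < 3 := PySem.Int.mod_lt _ (by norm_num)
    interval_cases h : (PySem.Int.mod (x + b) 3) <;> simp [pvPat, PySem.List.pyGetD]

theorem pvGen_get (n b i : Int) (h0 : 0 ≤ i) (h1 : i < n) :
    PySem.List.pyGetD (pvGen n b) i ' ' = PySem.List.pyGetD pvPat (PySem.Int.mod (i + b) 3) ' ' := by
  rw [pvGen_eq]
  exact PySem.List.pyGetD_map_pyRange_of_nonneg _ n i ' ' h0 h1

-- the common per-phase value: fold of min over window mismatch sums
def pvPhase (cs : List Char) (n k xi : Int) (ans : Int) : Int :=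
  (PySem.List.pyRange 0 (n - k + 1) 1).foldl
    (fun a st => min a (pvSum cs xi st (st + k))) ans

theorem pvA_first (cs : List Char) (k n xi : Int) (hkn : k ≤ n) :
    ((PySem.List.pyRange 0 k 1).foldl (fun d i =>
      if PySem.List.pyGetD cs i ' ' ≠ PySem.List.pyGetD (pvGen n xi) i ' ' then d + 1 else d) 0)
    = pvSum cs xi 0 k := by
  rw [PySem.List.foldl_congr_mem (g := fun d i => d + pvMis cs xi i)]
  · rw [PySem.List.foldl_add]
    simp [pvSum]
  · intro acc x hx
    rw [PySem.List.mem_pyRange_one] at hx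
    rw [pvGen_get n xi x hx.1 (lt_of_lt_of_le hx.2 hkn)]
    unfold pvMis
    split <;> simp

theorem pvA_slide (cs : List Char) (n k xi : Int) (hk : 0 ≤ k) :
    ∀ (m : Nat) (j ans : Int), k ≤ j → j ≤ n → m = (n - j).toNat →
    ((PySem.List.pyRange j n 1).foldl (fun (st : Int × Int) j =>
      let d1 := if PySem.List.pyGetD cs (j - k) ' ' ≠ PySem.List.pyGetD (pvGen n xi) (j - k) ' ' then st.2 - 1 else st.2
      let d2 := if PySem.List.pyGetD cs j ' ' ≠ PySem.List.pyGetD (pvGen n xi) j ' ' then d1 + 1 else d1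
      (min st.1 d2, d2)) (ans, pvSum cs xi (j - k) j)).1
    = (PySem.List.pyRange (j - k + 1) (n - k + 1) 1).foldl
        (fun a st => min a (pvSum cs xi st (st + k))) ans := by
  intro m
  induction m with
  | zero =>
    intro j ans hkj hjn hm
    have hj : j = n := by omega
    subst hj
    rw [PySem.List.pyRange_one_eq_nil (le_refl _), PySem.List.pyRange_one_eq_nil (le_refl _)]
    simp
  | succ m ih =>
    intro j ans hkj hjn hm
    have hjn' : j < n := by omega
    rw [PySem.List.pyRange_one_cons hjn']
    simp only [List.foldl_cons]
    -- the new diff value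
    have hmisj : PySem.List.pyGetD (pvGen n xi) j ' ' = PySem.List.pyGetD pvPat (PySem.Int.mod (j + xi) 3) ' ' :=
      pvGen_get n xi j (by omega) hjn'
    have hmisjk : PySem.List.pyGetD (pvGen n xi) (j - k) ' ' = PySem.List.pyGetD pvPat (PySem.Int.mod ((j - k) + xi) 3) ' ' :=
      pvGen_get n xi (j - k) (by omega) (by omega)
    have hstep : (if PySem.List.pyGetD cs j ' ' ≠ PySem.List.pyGetD (pvGen n xi) j ' ' then
                    (if PySem.List.pyGetD cs (j - k) ' ' ≠ PySem.List.pyGetD (pvGen n xi) (j - k) ' ' then (pvSum cs xi (j - k) j) - 1 else (pvSum cs xi (j - k) j)) + 1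
                  else
                    (if PySem.List.pyGetD cs (j - k) ' ' ≠ PySem.List.pyGetD (pvGen n xi) (j - k) ' ' then (pvSum cs xi (j - k) j) - 1 else (pvSum cs xi (j - k) j)))
                 = pvSum cs xi (j - k + 1) (j + 1) := by
      have e1 : pvSum cs xi (j - k) (j + 1) = pvMis cs xi (j - k) + pvSum cs xi (j - k + 1) (j + 1) :=
        pvSum_cons cs xi _ _ (by omega)
      have e2 : pvSum cs xi (j - k) (j + 1) = pvSum cs xi (j - k) j + pvMis cs xi j :=
        pvSum_succ cs xi _ _ (by omega)
      rw [hmisj, hmisjk]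
      simp only [pvMis] at e1 e2 ⊢
      split_ifs at e1 e2 ⊢ <;> omega
    rw [hstep]
    have := ih (j + 1) (min ans (pvSum cs xi (j - k + 1) (j + 1))) (by omega) (by omega) (by omega)
    have harg : j + 1 - k = j - k + 1 := by omega
    rw [harg] at this
    rw [this]
    have hlt : j - k + 1 < n - k + 1 := by omega
    rw [PySem.List.pyRange_one_cons hlt]
    simp only [List.foldl_cons]
    have : j - k + 1 + k = j + 1 := by omega
    rw [this]

theorem pvB_prefix_aux (cs : List Char) (n xi : Int) :
    ∀ (m : Nat) (i : Int), 0 ≤ i → i ≤ n → m = (n - i).toNat →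
    ((PySem.List.pyRange i n 1).foldl (fun p i =>
      p ++ [PySem.List.pyGetD p (-1) 0 +
        (if PySem.List.pyGetD cs i ' ' ≠ PySem.List.pyGetD pvPat (PySem.Int.mod (i + xi) 3) ' ' then 1 else 0)])
      ((PySem.List.pyRange 0 (i + 1) 1).map (fun j => pvSum cs xi 0 j)))
    = (PySem.List.pyRange 0 (n + 1) 1).map (fun j => pvSum cs xi 0 j) := by
  intro m
  induction m with
  | zero =>
    intro i h0 hin hm
    have : i = n := by omega
    subst this
    rw [PySem.List.pyRange_one_eq_nil (le_refl _)]
    simp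
  | succ m ih =>
    intro i h0 hin hm
    have hlt : i < n := by omega
    rw [PySem.List.pyRange_one_cons hlt]
    simp only [List.foldl_cons]
    have hsplit : (PySem.List.pyRange 0 (i + 1) 1).map (fun j => pvSum cs xi 0 j)
        = (PySem.List.pyRange 0 i 1).map (fun j => pvSum cs xi 0 j) ++ [pvSum cs xi 0 i] := by
      rw [PySem.List.pyRange_one_succ_right h0, List.map_append]
      simp
    have hlast : PySem.List.pyGetD ((PySem.List.pyRange 0 (i + 1) 1).map (fun j => pvSum cs xi 0 j)) (-1) 0
        = pvSum cs xi 0 i := by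
      rw [hsplit]
      exact PySem.List.pyGetD_neg_one_append_singleton _ _ _
    rw [hlast]
    have hnew : (PySem.List.pyRange 0 (i + 1) 1).map (fun j => pvSum cs xi 0 j) ++
        [pvSum cs xi 0 i +
          (if PySem.List.pyGetD cs i ' ' ≠ PySem.List.pyGetD pvPat (PySem.Int.mod (i + xi) 3) ' ' then 1 else 0)]
        = (PySem.List.pyRange 0 (i + 1 + 1) 1).map (fun j => pvSum cs xi 0 j) := by
      rw [PySem.List.pyRange_one_succ_right (by omega : (0:Int) ≤ i + 1), List.map_append]
      simp only [List.map_cons, List.map_nil]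
      rw [pvSum_succ cs xi 0 i h0]
      rfl
    rw [hnew]
    exact ih (i + 1) (by omega) (by omega) (by omega)

theorem pvB_prefix (cs : List Char) (n xi : Int) (hn : 0 ≤ n) :
    ((PySem.List.pyRange 0 n 1).foldl (fun p i =>
      p ++ [PySem.List.pyGetD p (-1) 0 +
        (if PySem.List.pyGetD cs i ' ' ≠ PySem.List.pyGetD pvPat (PySem.Int.mod (i + xi) 3) ' ' then 1 else 0)]) [0])
    = (PySem.List.pyRange 0 (n + 1) 1).map (fun j => pvSum cs xi 0 j) := by
  have hinit : ([(0:Int)]) = (PySem.List.pyRange 0 (0 + 1) 1).map (fun j => pvSum cs xi 0 j) := by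
    rw [PySem.List.pyRange_one_singleton]
    simp [pvSum_empty cs xi 0 0 (le_refl _)]
  rw [hinit]
  exact pvB_prefix_aux cs n xi (n - 0).toNat 0 (le_refl _) hn rfl
theorem pvPhaseA (cs : List Char) (n k xi : Int) (hk : 0 ≤ k) (hkn : k ≤ n) (ans : Int) :
    (let t := pvGen n xi
     let diff := (PySem.List.pyRange 0 k 1).foldl (fun d i =>
       if PySem.List.pyGetD cs i ' ' ≠ PySem.List.pyGetD t i ' ' then d + 1 else d) 0
     let ans1 := min ans diff
     ((PySem.List.pyRange k n 1).foldl (fun (st : Int × Int) j =>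
       let d1 := if PySem.List.pyGetD cs (j - k) ' ' ≠ PySem.List.pyGetD t (j - k) ' ' then st.2 - 1 else st.2
       let d2 := if PySem.List.pyGetD cs j ' ' ≠ PySem.List.pyGetD t j ' ' then d1 + 1 else d1
       (min st.1 d2, d2)) (ans1, diff)).1)
    = pvPhase cs n k xi ans := by
  dsimp only
  rw [pvA_first cs k n xi hkn]
  have hinit : pvSum cs xi 0 k = pvSum cs xi (k - k) k := by
    rw [show k - k = (0:Int) by omega]
  rw [hinit]
  rw [pvA_slide cs n k xi hk (n - k).toNat k (min ans (pvSum cs xi (k - k) k)) (le_refl _) hkn rfl]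
  unfold pvPhase
  rw [PySem.List.pyRange_one_cons (by omega : (0:Int) < n - k + 1)]
  simp only [List.foldl_cons]
  rw [show k - k + 1 = (0:Int) + 1 by omega, show (0:Int) + k = k by omega,
      show k - k = (0:Int) by omega]

theorem pvPhaseB (cs : List Char) (n k xi : Int) (hk : 0 ≤ k) (hkn : k ≤ n) (best : Int) :
    (let p := (PySem.List.pyRange 0 n 1).foldl (fun p i =>
       p ++ [PySem.List.pyGetD p (-1) 0 +
         (if PySem.List.pyGetD cs i ' ' ≠ PySem.List.pyGetD pvPat (PySem.Int.mod (i + xi) 3) ' ' then 1 else 0)]) [0]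
     (PySem.List.pyRange 0 (n - k + 1) 1).foldl (fun best start =>
       let c := PySem.List.pyGetD p (start + k) 0 - PySem.List.pyGetD p start 0
       if c < best then c else best) best)
    = pvPhase cs n k xi best := by
  dsimp only
  rw [pvB_prefix cs n xi (by omega)]
  unfold pvPhase
  apply PySem.List.foldl_congr_mem
  intro acc st hst
  rw [PySem.List.mem_pyRange_one] at hst
  rw [PySem.List.pyGetD_map_pyRange_of_nonneg _ (n+1) (st+k) 0 (by omega) (by omega)]
  rw [PySem.List.pyGetD_map_pyRange_of_nonneg _ (n+1) st 0 (by omega) (by omega)]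
  have hsplit : pvSum cs xi 0 (st + k) = pvSum cs xi 0 st + pvSum cs xi st (st + k) :=
    pvSum_split cs xi 0 st (st + k) (by omega) (by omega)
  have : pvSum cs xi 0 (st + k) - pvSum cs xi 0 st = pvSum cs xi st (st + k) := by omega
  rw [this]
  rcases le_or_gt acc (pvSum cs xi st (st + k)) with h | h
  · rw [if_neg (by omega), min_eq_left h]
  · rw [if_pos h, min_eq_right (by omega)]

theorem pvMain (n k : Int) (s : String) (hk : 0 ≤ k) (hkn : k ≤ n) :
    solve_single n k s = solve_single_alt n k s := by
  unfold solve_single solve_single_alt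
  dsimp only
  apply PySem.List.foldl_congr_mem
  intro ans xi _
  rw [pvPhaseA s.toList n k xi hk hkn ans, pvPhaseB s.toList n k xi hk hkn ans]

theorem pvCorner (n k : Int) (s : String) (hn : n < 0) (hnk : n ≤ k) (hk : k ≤ 0)
    (hc : n < k ∨ k = -1) : solve_single n k s = solve_single_alt n k s := by
  unfold solve_single solve_single_alt
  dsimp only
  rw [show PySem.List.pyRange 0 3 1 = [0, 1, 2] from by decide]
  simp only [List.foldl_cons, List.foldl_nil]
  rw [PySem.List.pyRange_one_eq_nil hk, PySem.List.pyRange_one_eq_nil hnk,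
      PySem.List.pyRange_one_eq_nil (by omega : n ≤ (0:Int))]
  simp only [List.foldl_nil]
  by_cases h : n < k
  · rw [PySem.List.pyRange_one_eq_nil (by omega : n - k + 1 ≤ (0:Int))]
    simp only [List.foldl_nil]
    omega
  · have hk' : k = -1 := by omega
    have hn' : n = -1 := by omega
    subst hk' hn'
    decide

-- ===== VERDICT (by name: the statement is the Claim_ definition above) =====
theorem solve_single_spec : Claim_equal_solve_single := by
  intro n k s _ hpre
  unfold Spec_solve_single
  rcases hpre with ⟨hk, hkn, _⟩ | ⟨hn, hnk, hk, hc⟩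
  · exact pvMain n k s hk hkn
  · exact pvCorner n k s hn hnk hk hc
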